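-- pv_equiv track=rewrite | github.com/weoverme/Potentially_T_F | Main/myClassifier.py | __get_training_target
-- ===== SOURCE A (Python) =====
-- def __get_training_target(sample):
--     """
--     Returns the label depending on the sample given.
--
--     :param sample: int[] from self.__get_sample()
--     :return: "VER" or "NVER", representing the two labels Verifiable and Non-Verifiable
--     """
--     # check sample if VER or NVER
--     t_sum = 0
--     for v in sample:
--         if v < 0:
--             # if there exists a "?" in the sample text
--             # (this is the only reason why there'd be a -ve value in curr_sv)
--             t_sum = -1
--             break
--
--         t_sum += v
--
--     if t_sum > 0:
--         return "VER"
--     else: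
--         return "NVER"
-- ===== SOURCE B (Python) =====
-- def __get_training_target(sample):
--     """VER iff all values are non-negative and their sum is positive; else NVER."""
--     if all(v >= 0 for v in sample) and sum(sample) > 0:
--         return "VER"
--     return "NVER"
-- ===== Notes on version B (the rewrite author's own statement) =====
-- stated objective: simpler
-- what changed: Replaces the accumulator loop with a -1 sentinel and break by a direct predicate: all(v >= 0) combined with sum(sample) > 0.
import Mathlib
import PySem

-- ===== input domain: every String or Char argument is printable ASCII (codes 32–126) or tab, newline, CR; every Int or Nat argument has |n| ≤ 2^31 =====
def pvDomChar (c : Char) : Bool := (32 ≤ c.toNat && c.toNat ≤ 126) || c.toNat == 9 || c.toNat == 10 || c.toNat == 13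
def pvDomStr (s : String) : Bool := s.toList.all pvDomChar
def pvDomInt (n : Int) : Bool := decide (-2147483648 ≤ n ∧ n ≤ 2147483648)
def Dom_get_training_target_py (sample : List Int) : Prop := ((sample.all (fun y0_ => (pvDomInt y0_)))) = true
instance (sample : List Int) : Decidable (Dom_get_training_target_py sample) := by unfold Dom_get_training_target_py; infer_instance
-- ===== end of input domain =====

-- B replaces A's sentinel/break accumulator loop by a direct predicate (all non-negative ∧ positive sum); objective: simpler.

-- ===== PORT A =====
-- the for-loop with break: returns the final t_sum (stops with -1 at the first negative)
def getTrainingLoopA : List Int → Int → Int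
  | [], acc => acc
  | v :: rest, acc => if v < 0 then -1 else getTrainingLoopA rest (acc + v)

def get_training_target_py (sample : List Int) : String :=
  let t_sum := getTrainingLoopA sample 0
  if t_sum > 0 then "VER" else "NVER"

-- ===== PORT B =====
def get_training_target_py_alt (sample : List Int) : String :=
  if sample.all (fun v => decide (v ≥ 0)) ∧ sample.sum > 0 then "VER" else "NVER"

-- ===== PRECONDITION & SPEC =====
def Spec_get_training_target_py (sample : List Int) (out : String) : Prop := out = get_training_target_py_alt sample
instance (sample : List Int) (out : String) : Decidable (Spec_get_training_target_py sample out) := by unfold Spec_get_training_target_py; infer_instance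

-- ===== CLAIM (what is proved, stated in full; the proofs are below) =====
def Claim_equal_get_training_target_py : Prop := ∀ (sample : List Int), Dom_get_training_target_py sample → Spec_get_training_target_py sample (get_training_target_py sample)

-- ===== LEMMAS AND PROOFS =====

-- characterisation of A's loop: acc + sum if every element is non-negative, else -1
theorem getTrainingLoopA_char (sample : List Int) (acc : Int) :
    getTrainingLoopA sample acc =
      if sample.all (fun v => decide (v ≥ 0)) then acc + sample.sum else -1 := by
  induction sample generalizing acc with
  | nil => simp [getTrainingLoopA]
  | cons v rest ih =>
    simp only [getTrainingLoopA, List.all_cons, List.sum_cons]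
    by_cases hv : v < 0
    · simp [hv, show ¬ v ≥ 0 by omega]
    · rw [if_neg hv, ih]
      have : v ≥ 0 := by omega
      simp [this]
      split <;> [ring_nf; rfl]

-- ===== VERDICT (by name: the statement is the Claim_ definition above) =====
theorem get_training_target_py_spec : Claim_equal_get_training_target_py := by
  intro sample _
  unfold Spec_get_training_target_py get_training_target_py get_training_target_py_alt
  rw [getTrainingLoopA_char]
  by_cases h : sample.all (fun v => decide (v ≥ 0)) = true
  · simp [h]
  · simp [h]
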